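-- pv_equiv track=rewrite | github.com/subramani-tejas/python-algorithms | my_sclr/day_8_carry/01_pattern_match.py | count_ag2
-- ===== SOURCE A (Python) =====
-- def count_ag2(text):
--     carry = 0
--     ans = 0
--     for char in text:
--         if char == 'a':
--             carry += 1
--         if char == 'g':
--             ans += carry
--     return ans
-- ===== SOURCE B (Python) =====
-- def count_ag2(text):
--     prefa = [0]
--     for ch in text:
--         prefa.append(prefa[-1] + (1 if ch == 'a' else 0))
--     ans = 0
--     for p, ch in zip(prefa, text):
--         if ch == 'g':
--             ans += p
--     return ans
-- ===== Notes on version B (the rewrite author's own statement) =====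
-- stated objective: alternative
-- what changed: Replaces the single inline carry-accumulation loop by a two-pass decomposition: first build a prefix-count table of first-letter occurrences, then a separate scan that adds the table entry at each second-letter position.
import Mathlib
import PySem

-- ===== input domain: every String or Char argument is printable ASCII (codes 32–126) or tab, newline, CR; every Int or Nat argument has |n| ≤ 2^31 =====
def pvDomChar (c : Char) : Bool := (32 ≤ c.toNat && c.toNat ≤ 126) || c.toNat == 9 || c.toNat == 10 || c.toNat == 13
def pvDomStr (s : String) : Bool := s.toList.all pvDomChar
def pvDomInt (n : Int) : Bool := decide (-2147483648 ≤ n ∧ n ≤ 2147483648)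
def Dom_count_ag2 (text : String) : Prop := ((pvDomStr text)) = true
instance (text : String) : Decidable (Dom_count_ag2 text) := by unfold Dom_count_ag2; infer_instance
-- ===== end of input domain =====

-- B replaces A's single carry-accumulating loop by a prefix-count table pass followed by a separate scan (objective: alternative decomposition).

-- ===== PORT A =====
-- one pass: carry counts 'a's seen so far, ans accumulates carry at each 'g'
def count_ag2 (text : String) : Int :=
  (text.toList.foldl
    (fun (s : Int × Int) c =>
      let carry := if c = 'a' then s.1 + 1 else s.1
      let ans := if c = 'g' then s.2 + carry else s.2
      (carry, ans))
    (0, 0)).2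

-- ===== PORT B =====
-- first pass of Source B: prefa.append(prefa[-1] + (1 if ch=='a' else 0)); acc is prefa[-1]
def buildPrefa (l : List Char) (acc : Int) : List Int :=
  match l with
  | [] => []
  | c :: cs =>
      let a := acc + (if c = 'a' then 1 else 0)
      a :: buildPrefa cs a

def count_ag2_alt (text : String) : Int :=
  let prefa : List Int := 0 :: buildPrefa text.toList 0
  (List.zip prefa text.toList).foldl
    (fun ans pc => if pc.2 = 'g' then ans + pc.1 else ans) 0

-- ===== PRECONDITION & SPEC =====
def Spec_count_ag2 (text : String) (out : Int) : Prop := out = count_ag2_alt text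
instance (text : String) (out : Int) : Decidable (Spec_count_ag2 text out) := by unfold Spec_count_ag2; infer_instance

-- ===== CLAIM (what is proved, stated in full; the proofs are below) =====
def Claim_equal_count_ag2 : Prop := ∀ (text : String), Dom_count_ag2 text → Spec_count_ag2 text (count_ag2 text)

-- ===== LEMMAS AND PROOFS =====

theorem count_ag2_loops_eq (l : List Char) (carry ans : Int) :
    (l.foldl
      (fun (s : Int × Int) c =>
        let carry := if c = 'a' then s.1 + 1 else s.1
        let ans := if c = 'g' then s.2 + carry else s.2
        (carry, ans))
      (carry, ans)).2
    = (List.zip (carry :: buildPrefa l carry) l).foldl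
        (fun ans pc => if pc.2 = 'g' then ans + pc.1 else ans) ans := by
  induction l generalizing carry ans with
  | nil => simp
  | cons c cs ih =>
      have hc : (if c = 'a' then carry + 1 else carry) = carry + (if c = 'a' then (1:Int) else 0) := by
        split_ifs <;> ring
      have hans : (if c = 'g' then ans + (if c = 'a' then carry + 1 else carry) else ans)
          = (if c = 'g' then ans + carry else ans) := by
        by_cases hg : c = 'g'
        · have ha : ¬ c = 'a' := by subst hg; decide
          simp [hg, ha]
        · simp [hg]
      simp only [List.foldl_cons, buildPrefa, List.zip_cons_cons]
      rw [ih, hans, hc]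

-- ===== VERDICT (by name: the statement is the Claim_ definition above) =====
theorem count_ag2_spec : Claim_equal_count_ag2 := by
  intro text _
  unfold Spec_count_ag2 count_ag2 count_ag2_alt
  exact count_ag2_loops_eq text.toList 0 0
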